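-- pv_equiv track=rewrite | github.com/Vashy/AlphaSix | Butterfly/mongo_db/users.py | match_keyword_commit
-- ===== SOURCE A (Python) =====
-- def match_keyword_commit(
--     keywords: list,
--     commit_msg: str,
--     case=True
-- ) -> bool:
--     """Restituisce `True` se `commit_msg` contiene una
--     o più keyword contenute in `keywords`.
--     `case` è `True` se la ricerca è case sensitive, `False`
--     altrimenti.
--     """
--     if case is True:
--         for keyword in keywords:
--             if keyword in commit_msg:
--                 return True
--         return False
--
--     # Case insensitive
--     for keyword in keywords:
--         if keyword.lower() in commit_msg.lower():
--             return True
--     return False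
-- ===== SOURCE B (Python) =====
-- def match_keyword_commit(
--     keywords: list,
--     commit_msg: str,
--     case=True
-- ) -> bool:
--     """True iff commit_msg contains at least one of keywords;
--     case-insensitive when case is False.
--     Keywords are bucketed by first character, so each text position
--     only tries the keywords that can actually start there."""
--     text = commit_msg if case else commit_msg.lower()
--     kws = keywords if case else [k.lower() for k in keywords]
--     if "" in kws:
--         return True  # the empty pattern matches any text
--     by_first = {}
--     for k in kws:
--         by_first.setdefault(k[0], []).append(k)
--     for i, c in enumerate(text):
--         for k in by_first.get(c, []):
--             if text.startswith(k, i):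
--                 return True
--     return False
-- ===== Notes on version B (the rewrite author's own statement) =====
-- stated objective: alternative
-- what changed: B lowers the message and keywords once, buckets the keywords by their first character, and scans the text in a single left-to-right pass trying at each position only the bucket of keywords that can start there, instead of A's keyword-outer substring loop that re-lowers the whole message for every keyword.
import Mathlib
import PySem

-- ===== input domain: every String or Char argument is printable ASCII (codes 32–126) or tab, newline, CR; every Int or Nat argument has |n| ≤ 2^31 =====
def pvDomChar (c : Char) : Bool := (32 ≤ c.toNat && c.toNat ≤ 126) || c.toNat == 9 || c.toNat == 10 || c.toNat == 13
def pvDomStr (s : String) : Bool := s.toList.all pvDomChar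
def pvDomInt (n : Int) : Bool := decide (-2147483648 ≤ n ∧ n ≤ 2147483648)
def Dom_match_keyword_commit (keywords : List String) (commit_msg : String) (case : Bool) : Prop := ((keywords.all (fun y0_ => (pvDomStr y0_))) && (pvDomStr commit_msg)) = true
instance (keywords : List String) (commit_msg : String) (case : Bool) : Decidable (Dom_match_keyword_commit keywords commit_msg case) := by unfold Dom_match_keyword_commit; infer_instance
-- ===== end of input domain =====

-- B buckets the (once-lowered) keywords by their first character and scans the text once,
-- trying at each position only the keywords that can start there; A loops over keywords,
-- re-lowering the whole message per keyword. Objective: alternative (equal on the whole domain).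


-- ===== PORT A =====
-- 'for keyword in keywords: if keyword in commit_msg: return True' (early return)
def pvGoA (keywords : List String) (commit_msg : String) : Bool :=
  match keywords with
  | [] => false
  | k :: rest => if PySem.Str.isIn k commit_msg then true else pvGoA rest commit_msg

-- case-insensitive branch: lowers the keyword AND the whole message on every iteration, as A does
def pvGoACI (keywords : List String) (commit_msg : String) : Bool :=
  match keywords with
  | [] => false
  | k :: rest =>
      if PySem.Str.isIn (PySem.Str.lower k) (PySem.Str.lower commit_msg) then true
      else pvGoACI rest commit_msg

def match_keyword_commit (keywords : List String) (commit_msg : String) (case : Bool) : Bool :=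
  if case = true then pvGoA keywords commit_msg
  else pvGoACI keywords commit_msg

-- ===== PORT B =====
-- k[0]; in B it is only reached for nonempty k (the '"" in kws' early return fired otherwise)
def pvFirstCh (s : String) : Char := s.toList.headD ' '

-- text.startswith(k, i) with 0 ≤ i ≤ len(text) is exactly startswith on toList.drop i
def match_keyword_commit_alt (keywords : List String) (commit_msg : String) (case : Bool) : Bool :=
  let text := if case then commit_msg else PySem.Str.lower commit_msg
  let kws := if case then keywords else keywords.map PySem.Str.lower
  if kws.any (· == "") then true
  else
    let byFirst := kws.foldl (fun d k => d.modify (pvFirstCh k) [] (· ++ [k])) PySem.Dict.empty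
    (PySem.List.enumerate text.toList 0).any (fun p =>
      (byFirst.getD p.2 []).any (fun k =>
        PySem.Chars.startswith (text.toList.drop p.1.toNat) k.toList))

-- ===== PRECONDITION & SPEC =====
def Spec_match_keyword_commit (keywords : List String) (commit_msg : String) (case : Bool) (out : Bool) : Prop := out = match_keyword_commit_alt keywords commit_msg case
instance (keywords : List String) (commit_msg : String) (case : Bool) (out : Bool) : Decidable (Spec_match_keyword_commit keywords commit_msg case out) := by unfold Spec_match_keyword_commit; infer_instance

-- ===== CLAIM (what is proved, stated in full; the proofs are below) =====
def Claim_equal_match_keyword_commit : Prop := ∀ (keywords : List String) (commit_msg : String) (case : Bool), Dom_match_keyword_commit keywords commit_msg case → Spec_match_keyword_commit keywords commit_msg case (match_keyword_commit keywords commit_msg case)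

-- ===== LEMMAS AND PROOFS =====

-- A's early-return keyword loop is List.any of the substring test
lemma pvGoA_eq (keywords : List String) (msg : String) :
    pvGoA keywords msg = keywords.any (fun k => PySem.Str.isIn k msg) := by
  induction keywords with
  | nil => rfl
  | cons k rest ih =>
      simp only [pvGoA, List.any_cons, ih]
      cases PySem.Str.isIn k msg <;> simp

lemma pvGoACI_eq (keywords : List String) (msg : String) :
    pvGoACI keywords msg
      = keywords.any (fun k => PySem.Str.isIn (PySem.Str.lower k) (PySem.Str.lower msg)) := by
  induction keywords with
  | nil => rfl
  | cons k rest ih =>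
      simp only [pvGoACI, List.any_cons, ih]
      cases PySem.Str.isIn (PySem.Str.lower k) (PySem.Str.lower msg) <;> simp

-- the bucket for character c holds exactly the keywords starting with c, in order
lemma bucket_getD (ks : List String) (c : Char) :
    (ks.foldl (fun d k => d.modify (pvFirstCh k) [] (· ++ [k])) PySem.Dict.empty).getD c []
      = ks.filter (fun k => pvFirstCh k == c) := by
  have h := PySem.Dict.getD_foldl_modify_append
    (l := ks.map (fun k => (pvFirstCh k, k))) (d := PySem.Dict.empty) (c := c)
  rw [List.foldl_map] at h
  simpa [List.filter_map, List.map_map, Function.comp_def] using h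

-- B's bucketed position scan finds a keyword iff some keyword is a substring,
-- provided no keyword is empty
lemma scan_eq_any_isIn (ks : List String) (t : String) (hne : ks.any (· == "") = false) :
    ((PySem.List.enumerate t.toList 0).any (fun p =>
        ((ks.foldl (fun d k => d.modify (pvFirstCh k) [] (· ++ [k])) PySem.Dict.empty).getD p.2 []).any
          (fun k => PySem.Chars.startswith (t.toList.drop p.1.toNat) k.toList)))
      = ks.any (fun k => PySem.Str.isIn k t) := by
  have hnil : ∀ k ∈ ks, k.toList ≠ [] := by
    intro k hk h
    have : k = "" := by
      simpa using congrArg String.ofList h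
    simp [List.any_eq_false] at hne
    exact (hne k hk) this
  apply Bool.eq_iff_iff.mpr
  simp only [List.any_eq_true, bucket_getD, List.mem_filter,
    PySem.List.mem_enumerate_iff, PySem.Chars.startswith_iff, PySem.Str.isIn_iff_infix]
  constructor
  · rintro ⟨p, ⟨j, hj, rfl⟩, k, ⟨hk, -⟩, hp⟩
    refine ⟨k, hk, (PySem.Chars.isIn_iff_infix _ _).mp ?_⟩
    exact (PySem.Chars.exists_prefix_drop_iff_isIn _ _).mp ⟨j, by simpa using hp⟩
  · rintro ⟨k, hk, hin⟩
    obtain ⟨j, hp⟩ := (PySem.Chars.exists_prefix_drop_iff_isIn _ _).mpr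
      ((PySem.Chars.isIn_iff_infix _ _).mpr hin)
    have hkne := hnil k hk
    -- the prefix position j is inside the text since k is nonempty
    have hjlt : j < t.toList.length := by
      by_contra h
      rw [List.drop_eq_nil_of_le (by omega)] at hp
      exact hkne (List.prefix_nil.mp hp)
    refine ⟨((j : Int), t.toList[j]), ⟨j, hjlt, by simp⟩, k, ⟨hk, ?_⟩, by simpa using hp⟩
    -- k's first character is t[j]
    obtain ⟨u, hu⟩ := hp
    have hhead : (k.toList ++ u).headD ' ' = (t.toList.drop j).headD ' ' := by rw [hu]
    cases hkl : k.toList with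
    | nil => exact absurd hkl hkne
    | cons a l =>
        simp only [hkl, List.cons_append, List.headD_cons] at hhead
        simp [pvFirstCh, hkl, hhead, List.getElem?_eq_getElem hjlt]

-- ===== VERDICT (by name: the statement is the Claim_ definition above) =====
theorem match_keyword_commit_spec : Claim_equal_match_keyword_commit := by
  intro keywords commit_msg case _
  unfold Spec_match_keyword_commit match_keyword_commit match_keyword_commit_alt
  cases case with
  | true =>
      simp only [if_true, pvGoA_eq]
      cases hne : keywords.any (· == "") with
      | false => simp only [Bool.false_eq_true, if_false,
          scan_eq_any_isIn keywords commit_msg hne]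
      | true =>
          simp only [if_true]
          obtain ⟨k, hk, hke⟩ := List.any_eq_true.mp hne
          refine List.any_eq_true.mpr ⟨k, hk, ?_⟩
          have : k = "" := by simpa using hke
          subst this
          simp
  | false =>
      simp only [Bool.false_eq_true, if_false, pvGoACI_eq]
      cases hne : (keywords.map PySem.Str.lower).any (· == "") with
      | false =>
          have h := scan_eq_any_isIn (keywords.map PySem.Str.lower)
            (PySem.Str.lower commit_msg) hne
          simp only [List.any_map, Function.comp_def] at h
          simp only [Bool.false_eq_true, if_false, h]
      | true =>
          simp only [if_true]
          simp only [List.any_map, Function.comp_def] at hne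
          obtain ⟨k, hk, hke⟩ := List.any_eq_true.mp hne
          refine List.any_eq_true.mpr ⟨k, hk, ?_⟩
          have : PySem.Str.lower k = "" := by simpa using hke
          rw [this]
          simp
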